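-- pv_equiv track=rewrite | github.com/hidden0bi/pierdololo-do-matury-z-infy | maturalnie/matura 2024/zadania 3/zad 3.1/zad 3.1 te uznajo.py | nieparzysty_skrot
-- ===== SOURCE A (Python) =====
-- def nieparzysty_skrot(n):
--     skrot = 0
--     mnoznik = 1
--
--     while n > 0:
--         cyfra = n % 10
--         if cyfra % 2 != 0:
--             skrot = skrot + cyfra * mnoznik
--             mnoznik *= 10
--         n //= 10
--
--     return skrot
-- ===== SOURCE B (Python) =====
-- def nieparzysty_skrot(n):
--     if n <= 0:
--         return 0
--     r = nieparzysty_skrot(n // 10)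
--     d = n % 10
--     return r * 10 + d if d % 2 == 1 else r
-- ===== Notes on version B (the rewrite author's own statement) =====
-- stated objective: simpler
-- what changed: Replaces the iterative right-to-left loop with two accumulators (skrot, mnoznik) by a direct top-down recursion on the number with its last digit removed, appending each odd digit by shifting the recursive result one decimal place; no multiplier state is needed.
import Mathlib
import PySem

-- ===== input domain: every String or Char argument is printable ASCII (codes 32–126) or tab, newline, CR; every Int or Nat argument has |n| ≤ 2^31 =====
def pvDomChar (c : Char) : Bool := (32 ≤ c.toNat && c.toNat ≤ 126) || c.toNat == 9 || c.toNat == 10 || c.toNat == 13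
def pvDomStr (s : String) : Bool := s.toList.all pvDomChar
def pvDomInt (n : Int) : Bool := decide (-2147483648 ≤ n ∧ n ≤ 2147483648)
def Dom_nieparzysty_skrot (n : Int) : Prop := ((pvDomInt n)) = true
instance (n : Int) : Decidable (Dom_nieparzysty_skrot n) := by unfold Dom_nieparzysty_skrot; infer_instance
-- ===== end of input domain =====

-- ===== PORT A =====
-- B replaces A's iterative accumulator loop by a top-down recursion (return value only; same function).
def nieparzysty_skrotLoop (n skrot mnoznik : Int) : Int :=
  if h : n > 0 then
    let cyfra := PySem.Int.mod n 10
    if PySem.Int.mod cyfra 2 != 0 then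
      nieparzysty_skrotLoop (PySem.Int.floordiv n 10) (skrot + cyfra * mnoznik) (mnoznik * 10)
    else
      nieparzysty_skrotLoop (PySem.Int.floordiv n 10) skrot mnoznik
  else skrot
termination_by n.toNat
decreasing_by
  all_goals
    rw [PySem.Int.floordiv_eq_ediv_of_pos (by norm_num : (0:Int) < 10)]
    omega

def nieparzysty_skrot (n : Int) : Int := nieparzysty_skrotLoop n 0 1

-- ===== PORT B =====
def nieparzysty_skrot_alt (n : Int) : Int :=
  if h : n ≤ 0 then 0
  else
    let r := nieparzysty_skrot_alt (PySem.Int.floordiv n 10)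
    let d := PySem.Int.mod n 10
    if PySem.Int.mod d 2 == 1 then r * 10 + d else r
termination_by n.toNat
decreasing_by
  rw [PySem.Int.floordiv_eq_ediv_of_pos (by norm_num : (0:Int) < 10)]
  omega

-- ===== PRECONDITION & SPEC =====
def Spec_nieparzysty_skrot (n : Int) (out : Int) : Prop := out = nieparzysty_skrot_alt n
instance (n : Int) (out : Int) : Decidable (Spec_nieparzysty_skrot n out) := by unfold Spec_nieparzysty_skrot; infer_instance

-- ===== CLAIM (what is proved, stated in full; the proofs are below) =====
def Claim_equal_nieparzysty_skrot : Prop := ∀ (n : Int), Dom_nieparzysty_skrot n → Spec_nieparzysty_skrot n (nieparzysty_skrot n)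

-- ===== LEMMAS AND PROOFS =====
theorem nieparzysty_skrotLoop_eq (n skrot mnoznik : Int) :
    nieparzysty_skrotLoop n skrot mnoznik = skrot + mnoznik * nieparzysty_skrot_alt n := by
  rw [nieparzysty_skrotLoop, nieparzysty_skrot_alt]
  by_cases h : n > 0
  · have hnl : ¬ (n ≤ 0) := by omega
    simp only [h, hnl, dif_pos, dif_neg, not_false_iff]
    have hm : PySem.Int.mod n 10 = n % 10 :=
      PySem.Int.mod_eq_emod_of_pos (by norm_num)
    have hm2 : PySem.Int.mod (n % 10) 2 = n % 10 % 2 :=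
      PySem.Int.mod_eq_emod_of_pos (by norm_num)
    have ih := nieparzysty_skrotLoop_eq (PySem.Int.floordiv n 10)
    simp only [hm, hm2, ih]
    by_cases hodd : n % 10 % 2 = 1
    · simp only [hodd]
      norm_num
      ring
    · have hz : n % 10 % 2 = 0 := by omega
      simp only [hz]
      norm_num
  · have hnl : n ≤ 0 := by omega
    simp [h, hnl]
termination_by n.toNat
decreasing_by
  rw [PySem.Int.floordiv_eq_ediv_of_pos (by norm_num : (0:Int) < 10)]
  omega

-- ===== VERDICT (by name: the statement is the Claim_ definition above) =====
theorem nieparzysty_skrot_spec : Claim_equal_nieparzysty_skrot := by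
  intro n _
  unfold Spec_nieparzysty_skrot nieparzysty_skrot
  rw [nieparzysty_skrotLoop_eq]
  ring
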